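-- pv_equiv track=rewrite | github.com/SidddhantJain/Crptography_Lab | key_routed_cipher.py | _column_order_from_key
-- ===== SOURCE A (Python) =====
-- import string
-- from typing import List, Tuple
--
-- ALPHA = string.ascii_uppercase
--
-- def _only_letters_up(s: str) -> str:
--     return "".join(ch for ch in s.upper() if ch in ALPHA)
--
-- def _column_order_from_key(key_str: str) -> List[int]:
--     # derive a pseudo-keyword from params (letters only)
--     kw = _only_letters_up(key_str)
--     if not kw:
--         kw = "KEY"
--     # order by alphabetical order with stable index
--     pairs = sorted([(ch, i) for i, ch in enumerate(kw)])
--     order = [None] * len(kw)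
--     for rank, (_ch, i) in enumerate(pairs):
--         order[i] = rank
--     return order
-- ===== SOURCE B (Python) =====
-- import string
--
-- ALPHA = string.ascii_uppercase
--
-- def _only_letters_up(s: str) -> str:
--     return "".join(ch for ch in s.upper() if ch in ALPHA)
--
-- def _column_order_from_key(key_str):
--     # bucket positions by letter, then assign consecutive ranks walking A..Z:
--     # same stable ranking as sorting (ch, i) pairs, with no comparison sort.
--     kw = _only_letters_up(key_str)
--     if not kw:
--         kw = "KEY"
--     buckets = {c: [] for c in ALPHA}
--     for i, ch in enumerate(kw):
--         buckets[ch].append(i)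
--     order = [0] * len(kw)
--     rank = 0
--     for c in ALPHA:
--         for i in buckets[c]:
--             order[i] = rank
--             rank += 1
--     return order
-- ===== Notes on version B (the rewrite author's own statement) =====
-- stated objective: alternative
-- what changed: Replaces the comparison sort of (ch, i) pairs with a counting-sort-style pass: positions are appended to 26 per-letter buckets left-to-right, then consecutive ranks are assigned walking the buckets in A..Z order, preserving the stable tie-break without any sort.
import Mathlib
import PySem

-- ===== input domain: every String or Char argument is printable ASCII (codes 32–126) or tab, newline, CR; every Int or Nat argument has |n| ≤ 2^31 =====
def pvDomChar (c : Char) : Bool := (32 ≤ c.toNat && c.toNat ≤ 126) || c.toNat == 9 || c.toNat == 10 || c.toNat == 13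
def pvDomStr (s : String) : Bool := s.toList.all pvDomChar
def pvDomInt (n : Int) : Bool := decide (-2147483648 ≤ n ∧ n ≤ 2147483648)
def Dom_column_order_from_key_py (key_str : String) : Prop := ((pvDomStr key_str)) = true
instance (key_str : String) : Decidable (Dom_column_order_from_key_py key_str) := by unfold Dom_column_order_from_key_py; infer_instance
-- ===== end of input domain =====

-- B replaces the comparison sort of (ch, i) pairs with 26 letter buckets filled
-- left-to-right and drained in A..Z order (idiomatic counting-sort-style ranking).

-- ===== PORT A =====
-- ALPHA = string.ascii_uppercase (its characters, in order)
def pvALPHA : List Char :=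
  ['A','B','C','D','E','F','G','H','I','J','K','L','M',
   'N','O','P','Q','R','S','T','U','V','W','X','Y','Z']

-- _only_letters_up (helper shared verbatim by both Pythons); 'ch in ALPHA' on a
-- single character is exactly list membership, ported as List.contains.
def pvLettersUp (s : String) : List Char :=
  (PySem.Chars.upper s.toList).filter (fun ch => pvALPHA.contains ch)

def column_order_from_key_py (key_str : String) : List Int :=
  let kw0 := pvLettersUp key_str
  let kw := if kw0 = [] then ['K','E','Y'] else kw0
  -- pairs = sorted([(ch, i) for i, ch in enumerate(kw)])  (tuple sort: sorted2)
  let pairs := PySem.List.sorted2 ((PySem.List.enumerate kw 0).map (fun p => (p.2, p.1)))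
      (fun q => q.1) (fun q => q.2)
  -- order = [None] * len(kw): every slot is overwritten below, so 0 is a mere placeholder
  let order0 : List Int := List.replicate kw.length 0
  (PySem.List.enumerate pairs 0).foldl (fun ord q => PySem.List.pySetD ord q.2.2 q.1) order0

-- ===== PORT B =====
def column_order_from_key_py_alt (key_str : String) : List Int :=
  let kw0 := pvLettersUp key_str
  let kw := if kw0 = [] then ['K','E','Y'] else kw0
  -- buckets = {c: [] for c in ALPHA}
  let buckets0 : PySem.Dict Char (List Int) :=
    pvALPHA.foldl (fun d c => d.insert c []) PySem.Dict.empty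
  -- for i, ch in enumerate(kw): buckets[ch].append(i)
  let buckets := (PySem.List.enumerate kw 0).foldl
      (fun d p => d.modify p.2 [] (fun l => l ++ [p.1])) buckets0
  -- order = [0]*len(kw); rank = 0; for c in ALPHA: for i in buckets[c]: order[i] = rank; rank += 1
  let st := pvALPHA.foldl
      (fun (st : List Int × Int) c =>
        (buckets.getD c []).foldl (fun st i => (PySem.List.pySetD st.1 i st.2, st.2 + 1)) st)
      (List.replicate kw.length 0, 0)
  st.1

-- ===== PRECONDITION & SPEC =====
def Spec_column_order_from_key_py (key_str : String) (out : List Int) : Prop := out = column_order_from_key_py_alt key_str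
instance (key_str : String) (out : List Int) : Decidable (Spec_column_order_from_key_py key_str out) := by unfold Spec_column_order_from_key_py; infer_instance

-- ===== CLAIM (what is proved, stated in full; the proofs are below) =====
def Claim_equal_column_order_from_key_py : Prop := ∀ (key_str : String), Dom_column_order_from_key_py key_str → Spec_column_order_from_key_py key_str (column_order_from_key_py key_str)

-- ===== LEMMAS AND PROOFS =====

-- Python's tuple sort of (Char, Int) pairs is the sort by the lexicographic key.
lemma pv_before_eq (a b : Char × Int) :
    (decide (a.1 < b.1) || (!decide (b.1 < a.1) && decide (a.2 < b.2)))
      = decide (toLex a < toLex b) := by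
  rcases lt_trichotomy a.1 b.1 with h | h | h
  · simp [Prod.Lex.toLex_lt_toLex, h, lt_asymm h]
  · simp [Prod.Lex.toLex_lt_toLex, h]
  · simp [Prod.Lex.toLex_lt_toLex, h, lt_asymm h, ne_of_gt h]

lemma pv_sorted2_eq_sorted_lex (xs : List (Char × Int)) :
    PySem.List.sorted2 xs (fun q => q.1) (fun q => q.2)
      = PySem.List.sorted xs (fun q => toLex q) := by
  have hb : (fun a b : Char × Int =>
        decide (a.1 < b.1) || (!decide (b.1 < a.1) && decide (a.2 < b.2)))
      = (fun a b : Char × Int => decide (toLex a < toLex b)) := by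
    funext a b; exact pv_before_eq a b
  simp only [PySem.List.sorted2, PySem.List.sorted, Bool.false_eq_true, if_false, hb]

lemma pv_flatMap_congr {α β : Type} {l : List α} {f g : α → List β}
    (h : ∀ a ∈ l, f a = g a) : l.flatMap f = l.flatMap g := by
  induction l with
  | nil => rfl
  | cons x xs ih =>
    simp only [List.flatMap_cons, h x (by simp)]
    rw [ih (fun a ha => h a (by simp [ha]))]

-- The alphabetical bucket concatenation is a permutation of the swapped pairs.
lemma pv_perm (cs : List Char) (ps : List (Int × Char)) (hnd : cs.Nodup)
    (hmem : ∀ p ∈ ps, p.2 ∈ cs) :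
    (cs.flatMap (fun c => (ps.filter (fun p => p.2 == c)).map (fun p => (c, p.1)))).Perm
      (ps.map (fun p => (p.2, p.1))) := by
  induction cs generalizing ps with
  | nil =>
    cases ps with
    | nil => simp
    | cons p ps => exact absurd (hmem p (by simp)) (by simp)
  | cons c cs ih =>
    have hc : c ∉ cs := (List.nodup_cons.mp hnd).1
    have hblocks : cs.flatMap (fun c' => (ps.filter (fun p => p.2 == c')).map (fun p => (c', p.1)))
        = cs.flatMap (fun c' => (((ps.filter (fun p => !(p.2 == c))).filter
            (fun p => p.2 == c')).map (fun p => (c', p.1)))) := by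
      apply pv_flatMap_congr
      intro c' hc'
      rw [List.filter_filter]
      congr 1
      apply List.filter_congr
      intro p _
      by_cases h : p.2 = c' <;> simp [h]
      intro h'
      exact absurd (h' ▸ hc') hc
    have hrec := ih (ps.filter (fun p => !(p.2 == c))) (List.nodup_cons.mp hnd).2
      (by
        intro p hp
        have h1 := hmem p (List.mem_of_mem_filter hp)
        have h2 := (List.mem_filter.mp hp).2
        simp only [Bool.not_eq_eq_eq_not, Bool.not_true, beq_eq_false_iff_ne, ne_eq] at h2
        simpa [h2] using h1)
    have hhead : (ps.filter (fun p => p.2 == c)).map (fun p => ((c : Char), p.1))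
        = (ps.filter (fun p => p.2 == c)).map (fun p => (p.2, p.1)) := by
      apply List.map_congr_left
      intro p hp
      have := (List.mem_filter.mp hp).2
      simp only [beq_iff_eq] at this
      rw [this]
    have h1 : (c :: cs).flatMap (fun c' => (ps.filter (fun p => p.2 == c')).map (fun p => (c', p.1)))
        = (ps.filter (fun p => p.2 == c)).map (fun p => (p.2, p.1))
            ++ cs.flatMap (fun c' => (((ps.filter (fun p => !(p.2 == c))).filter
                (fun p => p.2 == c')).map (fun p => (c', p.1)))) := by
      rw [List.flatMap_cons, hhead, ← hblocks]
    rw [h1]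
    refine List.Perm.trans (List.Perm.append_left _ hrec) ?_
    rw [← List.map_append]
    exact List.Perm.map _ (List.filter_append_perm (fun p => p.2 == c) ps)

-- The bucket concatenation is strictly increasing in the lexicographic key.
lemma pv_pairwise (cs : List Char) (ps : List (Int × Char)) (hcs : cs.Pairwise (· < ·))
    (hps : ps.Pairwise (fun p q => p.1 < q.1)) :
    (cs.flatMap (fun c => (ps.filter (fun p => p.2 == c)).map (fun p => (c, p.1)))).Pairwise
      (fun a b => toLex a < toLex b) := by
  induction cs with
  | nil => simp
  | cons c cs ih =>
    rw [List.flatMap_cons, List.pairwise_append]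
    refine ⟨?_, ih (List.pairwise_cons.mp hcs).2, ?_⟩
    · refine List.Pairwise.map _ (fun p q h => ?_) (hps.filter _)
      simp [Prod.Lex.toLex_lt_toLex, h]
    · intro a ha b hb
      obtain ⟨p, _, rfl⟩ := List.mem_map.mp ha
      obtain ⟨c', hc', hbmem⟩ := List.mem_flatMap.mp hb
      obtain ⟨q, _, rfl⟩ := List.mem_map.mp hbmem
      simp [Prod.Lex.toLex_lt_toLex, (List.pairwise_cons.mp hcs).1 c' hc']

-- A's rank-assignment loop over enumerate(pairs) is B's (order, rank) fold
-- over the second components.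
lemma pv_assign (qs : List (Char × Int)) (ord : List Int) (r : Int) :
    (PySem.List.enumerate qs r).foldl (fun ord q => PySem.List.pySetD ord q.2.2 q.1) ord
      = ((qs.map (fun q => q.2)).foldl
          (fun (st : List Int × Int) i => (PySem.List.pySetD st.1 i st.2, st.2 + 1)) (ord, r)).1 := by
  induction qs generalizing ord r with
  | nil => simp [PySem.List.enumerate_nil]
  | cons q qs ih =>
    simp only [PySem.List.enumerate_cons, List.map_cons, List.foldl_cons]
    exact ih (PySem.List.pySetD ord q.2 r) (r + 1)

lemma pv_foldl_insert_nil_getD (cs : List Char) (d : PySem.Dict Char (List Int)) (c : Char)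
    (h : d.getD c [] = []) :
    (cs.foldl (fun d c => d.insert c ([] : List Int)) d).getD c [] = [] := by
  induction cs generalizing d with
  | nil => exact h
  | cons c0 cs ih =>
    refine ih _ ?_
    rw [PySem.Dict.getD_insert]
    split <;> simp [h]

-- What B's bucket dict holds at each letter.
lemma pv_buckets_getD (kw : List Char) (c : Char) :
    ((PySem.List.enumerate kw 0).foldl (fun d p => d.modify p.2 [] (fun l => l ++ [p.1]))
        (pvALPHA.foldl (fun d c => d.insert c []) PySem.Dict.empty)).getD c []
      = ((PySem.List.enumerate kw 0).filter (fun p => p.2 == c)).map (fun p => p.1) := by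
  have hswap : (PySem.List.enumerate kw 0).foldl
        (fun d p => d.modify p.2 [] (fun l => l ++ [p.1]))
        (pvALPHA.foldl (fun d c => d.insert c []) PySem.Dict.empty)
      = ((PySem.List.enumerate kw 0).map (fun p => (p.2, p.1))).foldl
        (fun d p => d.modify p.1 [] (fun l => l ++ [p.2]))
        (pvALPHA.foldl (fun d c => d.insert c []) PySem.Dict.empty) := by
    rw [List.foldl_map]
  rw [hswap, PySem.Dict.getD_foldl_modify_append,
    pv_foldl_insert_nil_getD pvALPHA _ c (by rw [PySem.Dict.getD_empty]),
    List.filter_map, List.map_map]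
  simp [Function.comp_def]

-- Core equality on the derived keyword.
set_option maxRecDepth 8192 in
lemma pv_core (kw : List Char) (hkw : ∀ ch ∈ kw, ch ∈ pvALPHA) :
    (PySem.List.enumerate (PySem.List.sorted2
          ((PySem.List.enumerate kw 0).map (fun p => (p.2, p.1)))
          (fun q => q.1) (fun q => q.2)) 0).foldl
        (fun ord q => PySem.List.pySetD ord q.2.2 q.1) (List.replicate kw.length 0)
      = (pvALPHA.foldl
          (fun (st : List Int × Int) c =>
            (((PySem.List.enumerate kw 0).foldl
                (fun d p => d.modify p.2 [] (fun l => l ++ [p.1]))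
                (pvALPHA.foldl (fun d c => d.insert c []) PySem.Dict.empty)).getD c []).foldl
              (fun st i => (PySem.List.pySetD st.1 i st.2, st.2 + 1)) st)
          (List.replicate kw.length 0, 0)).1 := by
  have hsort : PySem.List.sorted2 ((PySem.List.enumerate kw 0).map (fun p => (p.2, p.1)))
        (fun q => q.1) (fun q => q.2)
      = pvALPHA.flatMap (fun c => ((PySem.List.enumerate kw 0).filter
          (fun p => p.2 == c)).map (fun p => (c, p.1))) := by
    rw [pv_sorted2_eq_sorted_lex]
    refine PySem.List.sorted_eq_of_perm_of_pairwise_lt _ _ _ ?_ ?_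
    · refine pv_perm pvALPHA _ (by decide) ?_
      intro p hp
      obtain ⟨k, hk, rfl⟩ := (PySem.List.mem_enumerate_iff _ _ _).mp hp
      exact hkw _ (List.getElem_mem hk)
    · exact pv_pairwise pvALPHA _ (by decide) (PySem.List.pairwise_lt_enumerate kw 0)
  rw [hsort, pv_assign]
  have hb := pv_buckets_getD kw
  simp only [hb, List.map_flatMap, List.map_map, ← List.foldl_flatMap]
  simp [Function.comp_def]

-- ===== VERDICT (by name: the statement is the Claim_ definition above) =====
theorem column_order_from_key_py_spec : Claim_equal_column_order_from_key_py := by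
  intro key_str _hdom
  unfold Spec_column_order_from_key_py column_order_from_key_py column_order_from_key_py_alt
  refine pv_core _ ?_
  split
  · intro ch h
    simp only [List.mem_cons, List.not_mem_nil, or_false] at h
    rcases h with rfl | rfl | rfl <;> decide
  · intro ch hch
    have := List.of_mem_filter (p := fun ch => pvALPHA.contains ch) hch
    simpa using this
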